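-- pv_equiv track=rewrite | github.com/ogkranthi/agentshift | src/agentshift/diff.py | _normalize_body
-- ===== SOURCE A (Python) =====
-- def _normalize_body(text: str) -> str:
--     """Normalize section body for comparison — strip trailing spaces, collapse blank lines."""
--     lines = [line.rstrip() for line in text.splitlines()]
--     # Collapse multiple blank lines into one
--     result: list[str] = []
--     prev_blank = False
--     for line in lines:
--         if not line:
--             if not prev_blank:
--                 result.append(line)
--             prev_blank = True
--         else:
--             result.append(line)
--             prev_blank = False
--     return "\n".join(result).strip()
-- ===== SOURCE B (Python) =====
-- def _normalize_body(text: str) -> str: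
--     """Normalize section body for comparison — strip trailing spaces, collapse blank lines."""
--     lines = [line.rstrip() for line in text.splitlines()]
--     # Two-pointer run scanner: slice out each maximal run of nonblank lines as a
--     # paragraph block, then join the blocks with a double newline.
--     blocks = []
--     i = 0
--     n = len(lines)
--     while i < n:
--         if not lines[i]:
--             i += 1
--             continue
--         j = i
--         while j < n and lines[j]:
--             j += 1
--         blocks.append("\n".join(lines[i:j]))
--         i = j
--     return "\n\n".join(blocks).strip()
-- ===== Notes on version B (the rewrite author's own statement) =====
-- stated objective: alternative
-- what changed: Replaces A's prev_blank flag state machine that filters a flat line list and joins it with single newlines by a two-pointer run scanner that slices each maximal run of nonblank lines out as a paragraph block and joins the blocks with double newlines.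
import Mathlib
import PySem

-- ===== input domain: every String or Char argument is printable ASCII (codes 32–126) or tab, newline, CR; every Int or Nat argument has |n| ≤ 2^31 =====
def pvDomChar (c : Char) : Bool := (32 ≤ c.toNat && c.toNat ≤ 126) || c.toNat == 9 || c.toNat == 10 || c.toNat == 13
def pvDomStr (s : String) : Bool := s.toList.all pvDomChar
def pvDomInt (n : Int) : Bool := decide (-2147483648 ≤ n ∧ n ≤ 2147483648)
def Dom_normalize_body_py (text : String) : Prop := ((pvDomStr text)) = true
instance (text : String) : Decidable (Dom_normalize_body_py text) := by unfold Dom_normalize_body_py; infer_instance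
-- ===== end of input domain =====

-- B replaces A's prev_blank filtering state machine by a two-pointer run scanner that
-- slices out maximal nonblank paragraph blocks and joins them with "\n\n" (alternative
-- decomposition, same cost; equal return value proved below).

-- ===== PORT A =====
-- rstrip each splitline, foldl state machine (result list, prev_blank), join "\n", strip.
def normalize_body_py (text : String) : String :=
  let lines := (PySem.Str.splitlines text).map PySem.Str.rstrip
  let st := lines.foldl
    (fun (st : List String × Bool) line =>
      if line = "" then
        (if st.2 = false then (st.1 ++ [line], true) else (st.1, true))
      else
        (st.1 ++ [line], false))
    ([], false)
  PySem.Str.strip (PySem.Str.join "\n" st.1)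

-- ===== PORT B =====
-- inner while loop 'while j < n and lines[j]: j += 1'
def pvScan (lines : List String) (j : Nat) : Nat :=
  if h : j < lines.length ∧ lines.getD j "" ≠ "" then pvScan lines (j + 1) else j
termination_by lines.length - j
decreasing_by omega

-- cited by pvOuter's decreasing_by: the scan never moves left, and moves right off a
-- nonblank line (the port needs this for termination only)
theorem pvScan_ge (lines : List String) (j : Nat) : j ≤ pvScan lines j := by
  induction hm : lines.length - j using Nat.strong_induction_on generalizing j with
  | _ m ih =>
    rw [pvScan]
    split
    · next h => have := ih (lines.length - (j + 1)) (by omega) (j + 1) rfl; omega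
    · exact Nat.le_refl j

theorem pvScan_lt (lines : List String) (i : Nat) (h1 : i < lines.length)
    (h2 : lines.getD i "" ≠ "") : i < pvScan lines i := by
  rw [pvScan]
  split
  · next h => have := pvScan_ge lines (i + 1); omega
  · next h => exact absurd ⟨h1, h2⟩ h

-- outer while loop over i, appending one joined block per nonblank run
def pvOuter (lines : List String) (blocks : List String) (i : Nat) : List String :=
  if h : i < lines.length then
    if lines.getD i "" = "" then pvOuter lines blocks (i + 1)
    else
      pvOuter lines
        (blocks ++ [PySem.Str.join "\n"
          (PySem.List.slice lines (some (i : Int)) (some ((pvScan lines i : Nat) : Int)))])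
        (pvScan lines i)
  else blocks
termination_by lines.length - i
decreasing_by
  · omega
  · have := pvScan_lt lines i (by omega) (by assumption); omega

def normalize_body_py_alt (text : String) : String :=
  let lines := (PySem.Str.splitlines text).map PySem.Str.rstrip
  PySem.Str.strip (PySem.Str.join "\n\n" (pvOuter lines [] 0))

-- ===== PRECONDITION & SPEC =====
def Spec_normalize_body_py (text : String) (out : String) : Prop := out = normalize_body_py_alt text
instance (text : String) (out : String) : Decidable (Spec_normalize_body_py text out) := by unfold Spec_normalize_body_py; infer_instance

-- ===== CLAIM (what is proved, stated in full; the proofs are below) =====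
def Claim_equal_normalize_body_py : Prop := ∀ (text : String), Dom_normalize_body_py text → Spec_normalize_body_py text (normalize_body_py text)

-- ===== LEMMAS AND PROOFS =====

-- nonblank test
def pvNB (l : String) : Bool := !(l == "")

-- A's collapse of blank-line runs, as a two-state recursion (pb = prev_blank)
def pvSq : List String → Bool → List String
  | [], _ => []
  | l :: t, pb =>
    if l = "" then (if pb then pvSq t true else "" :: pvSq t true) else l :: pvSq t false

-- B's paragraph blocks, as a structural spec
def pvBlocks (ls : List String) : List String :=
  match ls with
  | [] => []
  | l :: t =>
    if l = "" then pvBlocks t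
    else PySem.Str.join "\n" (l :: t.takeWhile pvNB) :: pvBlocks (t.dropWhile pvNB)
termination_by ls.length
decreasing_by
  · simp
  · have := List.length_dropWhile_le pvNB t; simp; omega

-- A's foldl computes pvSq
theorem pvFoldl_eq_sq (ls : List String) : ∀ (acc : List String) (pb : Bool),
    (ls.foldl
      (fun (st : List String × Bool) line =>
        if line = "" then
          (if st.2 = false then (st.1 ++ [line], true) else (st.1, true))
        else
          (st.1 ++ [line], false))
      (acc, pb)).1
    = acc ++ pvSq ls pb := by
  induction ls with
  | nil => intro acc pb; simp [pvSq]
  | cons l t ih =>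
    intro acc pb
    by_cases hl : l = ""
    · cases pb
      · simpa [hl, pvSq, ih (acc ++ [""]) true] using rfl
      · simpa [hl, pvSq, ih acc true] using rfl
    · simpa [hl, pvSq, ih (acc ++ [l]) false] using rfl

-- pvScan finds the end of the nonblank run starting at j
theorem pvScan_eq (lines : List String) (j : Nat) :
    pvScan lines j = j + ((lines.drop j).takeWhile pvNB).length := by
  induction hm : lines.length - j using Nat.strong_induction_on generalizing j with
  | _ m ih =>
    rw [pvScan]
    by_cases hj : j < lines.length
    · have hd : lines.drop j = lines.getD j "" :: lines.drop (j + 1) := by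
        have h0 : (lines.drop j).head? = lines[j]? := List.head?_drop
        have h1 : lines[j]? = some lines[j] := List.getElem?_eq_getElem hj
        cases hdrop : lines.drop j with
        | nil => rw [hdrop] at h0; rw [h1] at h0; simp at h0
        | cons a s =>
          rw [hdrop] at h0; rw [h1] at h0; simp at h0
          have : s = lines.drop (j + 1) := by
            have := congrArg (List.drop 1) hdrop
            simpa [List.drop_drop] using this.symm
          simp [List.getD_eq_getElem?_getD, h1, ← h0, this]
      by_cases hb : lines.getD j "" = ""
      · simp only [hj, hb, ne_eq, not_true_eq_false, and_false, dite_false]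
        rw [hd, hb]
        simp [List.takeWhile, pvNB]
      · simp only [hj, hb, ne_eq, not_false_eq_true, and_true, dite_true]
        rw [List.getD_eq_getElem?_getD] at hb
        have hnb : pvNB (lines.getD j "") = true := by simp [pvNB]; exact hb
        rw [ih (lines.length - (j + 1)) (by omega) (j + 1) rfl, hd, List.takeWhile_cons, hnb]
        simp
        omega
    · have : lines.drop j = [] := List.drop_eq_nil_of_le (by omega)
      simp [hj, this]

-- pvOuter computes pvBlocks of the remaining lines
theorem pvOuter_eq (lines : List String) : ∀ (blocks : List String) (i : Nat),
    pvOuter lines blocks i = blocks ++ pvBlocks (lines.drop i) := by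
  intro blocks i
  induction hm : lines.length - i using Nat.strong_induction_on generalizing blocks i with
  | _ m ih =>
    rw [pvOuter]
    by_cases hj : i < lines.length
    · have hd : lines.drop i = lines.getD i "" :: lines.drop (i + 1) := by
        have h0 : (lines.drop i).head? = lines[i]? := List.head?_drop
        have h1 : lines[i]? = some lines[i] := List.getElem?_eq_getElem hj
        cases hdrop : lines.drop i with
        | nil => rw [hdrop] at h0; rw [h1] at h0; simp at h0
        | cons a s =>
          rw [hdrop] at h0; rw [h1] at h0; simp at h0
          have : s = lines.drop (i + 1) := by
            have := congrArg (List.drop 1) hdrop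
            simpa [List.drop_drop] using this.symm
          simp [List.getD_eq_getElem?_getD, h1, ← h0, this]
      by_cases hb : lines.getD i "" = ""
      · simp only [hj, hb, dite_true, if_true]
        rw [ih (lines.length - (i + 1)) (by omega) blocks (i + 1) rfl, hd, hb]
        rw [pvBlocks]
        simp
      · simp only [hj, hb, dite_true, if_false]
        rw [List.getD_eq_getElem?_getD] at hb
        have hscan := pvScan_eq lines i
        have hlt := pvScan_lt lines i hj (by rw [List.getD_eq_getElem?_getD]; exact hb)
        rw [ih (lines.length - pvScan lines i) (by omega) _ (pvScan lines i) rfl]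
        have hslice : PySem.List.slice lines (some (i : Int)) (some ((pvScan lines i : Nat) : Int))
            = (lines.drop i).takeWhile pvNB := by
          rw [PySem.List.slice_natCast, hscan]
          have h2 : i + ((lines.drop i).takeWhile pvNB).length - i
              = ((lines.drop i).takeWhile pvNB).length := by omega
          rw [h2]
          have htd := List.take_left' (l₂ := (lines.drop i).dropWhile pvNB)
            (i := ((lines.drop i).takeWhile pvNB).length) rfl
          rw [List.takeWhile_append_dropWhile] at htd
          exact htd
        have hdropscan : lines.drop (pvScan lines i) = (lines.drop i).dropWhile pvNB := by
          rw [hscan, ← List.drop_drop]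
          have htd := List.drop_left' (l₂ := (lines.drop i).dropWhile pvNB)
            (i := ((lines.drop i).takeWhile pvNB).length) rfl
          rw [List.takeWhile_append_dropWhile] at htd
          exact htd
        have hbb : (lines[i]?.getD "" == "") = false := by simpa using hb
        have hnb : pvNB (lines.getD i "") = true := by
          simp [pvNB, List.getD_eq_getElem?_getD, hbb]
        rw [hslice, hdropscan]
        conv_rhs => rw [hd, pvBlocks]
        have htw : (lines.drop i).takeWhile pvNB
            = lines.getD i "" :: (lines.drop (i + 1)).takeWhile pvNB := by
          rw [hd, List.takeWhile_cons, hnb]; simp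
        have hdw : (lines.drop i).dropWhile pvNB = (lines.drop (i + 1)).dropWhile pvNB := by
          rw [hd, List.dropWhile_cons, hnb]; simp
        have hne : lines.getD i "" ≠ "" := by rw [List.getD_eq_getElem?_getD]; exact hb
        simp [hne, htw, hdw]
        exact fun hc => absurd hc hb
    · have : lines.drop i = [] := List.drop_eq_nil_of_le (by omega)
      simp [hj, this, pvBlocks]

-- intercalate over a cons with nonempty tail
theorem pvIcat_cons {α : Type} (s x : List α) (zs : List (List α)) (h : zs ≠ []) :
    List.intercalate s (x :: zs) = x ++ s ++ List.intercalate s zs := by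
  cases zs with
  | nil => exact absurd rfl h
  | cons z zs' => simp [List.intercalate, List.intersperse]

-- strip ignores newlines pushed at either end
theorem pvIsspace_nl : PySem.Chars.isspace '\n' = true := by decide

theorem pvStrip_cons_nl (s : List Char) :
    PySem.Chars.strip ('\n' :: s) = PySem.Chars.strip s := by
  simp [PySem.Chars.strip, PySem.Chars.lstrip, List.dropWhile, pvIsspace_nl]

theorem pvRstrip_append_nl (s : List Char) :
    PySem.Chars.rstrip (s ++ ['\n']) = PySem.Chars.rstrip s := by
  simp [PySem.Chars.rstrip, List.dropWhile, pvIsspace_nl]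

theorem pvStrip_append_nl (s : List Char) :
    PySem.Chars.strip (s ++ ['\n']) = PySem.Chars.strip s := by
  unfold PySem.Chars.strip
  by_cases h : PySem.Chars.lstrip s = []
  · have h1 : PySem.Chars.lstrip (s ++ ['\n']) = [] := by
      unfold PySem.Chars.lstrip at *
      rw [List.dropWhile_append, h]
      simp [List.dropWhile, pvIsspace_nl]
    rw [h, h1]
  · have h1 : PySem.Chars.lstrip (s ++ ['\n']) = PySem.Chars.lstrip s ++ ['\n'] := by
      unfold PySem.Chars.lstrip at *
      rw [List.dropWhile_append]
      simp [h]
    rw [h1, pvRstrip_append_nl]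

-- pvSq with prev_blank = true is empty iff there is no nonblank line iff no block
theorem pvSq_true_nil_iff (ls : List String) : pvSq ls true = [] ↔ ∀ l ∈ ls, l = "" := by
  induction ls with
  | nil => simp [pvSq]
  | cons l t ih =>
    by_cases hl : l = "" <;> simp [pvSq, hl, ih]

theorem pvBlocks_nil_iff (ls : List String) : pvBlocks ls = [] ↔ ∀ l ∈ ls, l = "" := by
  induction hm : ls.length using Nat.strong_induction_on generalizing ls with
  | _ m ih =>
    cases ls with
    | nil => simp [pvBlocks]
    | cons l t =>
      rw [pvBlocks]
      by_cases hl : l = ""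
      · simp only [hl, if_true]
        rw [ih t.length (by simp [← hm]) t rfl]
        simp [hl]
      · simp [hl]

-- abbreviations for the two join shapes, on char lists
def pvJ1 (xs : List String) : List Char := List.intercalate ['\n'] (xs.map String.toList)
def pvJ2 (xs : List String) : List Char := List.intercalate ['\n', '\n'] (xs.map String.toList)

theorem pvJ1_blocks_toList (g : List String) :
    (PySem.Str.join "\n" g).toList = pvJ1 g := by
  simp [PySem.Str.join, PySem.Chars.join, pvJ1]

theorem pvJ2_blocks_toList (g : List String) :
    (PySem.Str.join "\n\n" g).toList = pvJ2 g := by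
  simp [PySem.Str.join, PySem.Chars.join, pvJ2]

theorem pvJ1_nil : pvJ1 [] = [] := by simp [pvJ1, List.intercalate]

theorem pvJ2_nil : pvJ2 [] = [] := by simp [pvJ2, List.intercalate]

theorem pvJ1_singleton (x : String) : pvJ1 [x] = x.toList := by
  simp [pvJ1, List.intercalate, List.intersperse]

theorem pvJ2_singleton (x : String) : pvJ2 [x] = x.toList := by
  simp [pvJ2, List.intercalate, List.intersperse]

theorem pvJ1_cons (x : String) (xs : List String) (h : xs ≠ []) :
    pvJ1 (x :: xs) = x.toList ++ ['\n'] ++ pvJ1 xs := by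
  unfold pvJ1
  rw [List.map_cons, pvIcat_cons _ _ _ (by simpa using h)]

theorem pvJ2_cons (x : String) (xs : List String) (h : xs ≠ []) :
    pvJ2 (x :: xs) = x.toList ++ ['\n', '\n'] ++ pvJ2 xs := by
  unfold pvJ2
  rw [List.map_cons, pvIcat_cons _ _ _ (by simpa using h)]

theorem pvJoin1_cons (l : String) (g : List String) (h : g ≠ []) :
    (PySem.Str.join "\n" (l :: g)).toList
    = l.toList ++ ['\n'] ++ (PySem.Str.join "\n" g).toList := by
  rw [pvJ1_blocks_toList, pvJ1_blocks_toList, pvJ1_cons _ _ h]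

-- MAIN: joining A's collapsed lines (prev_blank = true) equals joining B's blocks
-- with "\n\n", up to trailing newlines
theorem pvMain (ls : List String) :
    ∃ b : Nat, pvJ1 (pvSq ls true) = pvJ2 (pvBlocks ls) ++ List.replicate b '\n' := by
  induction hm : ls.length using Nat.strong_induction_on generalizing ls with
  | _ m ih =>
    cases ls with
    | nil => exact ⟨0, by rw [pvBlocks]; simp [pvSq, pvJ1_nil, pvJ2_nil]⟩
    | cons l t =>
      by_cases hl : l = ""
      · subst hl
        rw [pvBlocks]
        simp only [if_pos rfl]
        have h2 : pvSq ("" :: t) true = pvSq t true := by simp [pvSq]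
        rw [h2]
        exact ih t.length (by simp [← hm]) t rfl
      · -- l nonblank: pvSq (l :: t) true = l :: pvSq t false
        have hsq : pvSq (l :: t) true = l :: pvSq t false := by simp [pvSq, hl]
        rw [hsq, pvBlocks]
        simp only [hl, if_false]
        cases t with
        | nil =>
          refine ⟨0, ?_⟩
          simp only [List.takeWhile_nil, List.dropWhile_nil]
          rw [show pvBlocks ([] : List String) = [] from by rw [pvBlocks]]
          rw [show pvSq ([] : List String) false = [] from rfl]
          rw [pvJ1_singleton, pvJ2_singleton, pvJ1_blocks_toList, pvJ1_singleton]
          simp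
        | cons l2 t' =>
          by_cases hl2 : l2 = ""
          · -- run is just [l]; rest starts blank
            have htw : (l2 :: t').takeWhile pvNB = [] := by simp [List.takeWhile, pvNB, hl2]
            have hdw : (l2 :: t').dropWhile pvNB = l2 :: t' := by simp [List.dropWhile, pvNB, hl2]
            rw [htw, hdw]
            have hsq2 : pvSq (l2 :: t') false = "" :: pvSq t' true := by simp [pvSq, hl2]
            rw [hsq2]
            have hblk : pvBlocks (l2 :: t') = pvBlocks t' := by rw [pvBlocks]; simp [hl2]
            rw [hblk]
            obtain ⟨b, hb⟩ := ih t'.length (by simp [← hm]) t' rfl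
            by_cases hnil : pvBlocks t' = []
            · -- no further blocks: everything after l is blank
              have hsqnil : pvSq t' true = [] := by
                rw [pvSq_true_nil_iff]
                exact (pvBlocks_nil_iff t').mp hnil
              refine ⟨1, ?_⟩
              rw [hsqnil, hnil]
              rw [pvJ2_singleton, pvJ1_cons _ _ (by simp), pvJ1_singleton,
                pvJ1_blocks_toList, pvJ1_singleton]
              simp
            · have hsqnn : pvSq t' true ≠ [] := by
                intro hc
                exact hnil ((pvBlocks_nil_iff t').mpr ((pvSq_true_nil_iff t').mp hc))
              refine ⟨b, ?_⟩
              rw [pvJ1_cons _ _ (by simp), pvJ1_cons _ _ hsqnn,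
                pvJ2_cons _ _ hnil, pvJ1_blocks_toList, pvJ1_singleton, hb]
              simp
          · -- run continues: first block extends by l
            have hnb2 : pvNB l2 = true := by simp [pvNB, hl2]
            have htw : (l2 :: t').takeWhile pvNB = l2 :: t'.takeWhile pvNB := by
              rw [List.takeWhile_cons, hnb2]; simp
            have hdw : (l2 :: t').dropWhile pvNB = t'.dropWhile pvNB := by
              rw [List.dropWhile_cons, hnb2]; simp
            have hsq2 : pvSq (l2 :: t') false = l2 :: pvSq t' false := by simp [pvSq, hl2]
            have hsq3 : pvSq (l2 :: t') true = l2 :: pvSq t' false := by simp [pvSq, hl2]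
            obtain ⟨b, hb⟩ := ih (l2 :: t').length (by simp [← hm]) (l2 :: t') rfl
            rw [hsq3] at hb
            rw [pvBlocks] at hb
            simp only [hl2, if_false] at hb
            refine ⟨b, ?_⟩
            rw [hsq2, htw, hdw]
            rw [pvJ1_cons _ _ (by simp)]
            have e2 : pvJ2 (PySem.Str.join "\n" (l :: l2 :: t'.takeWhile pvNB)
                  :: pvBlocks (t'.dropWhile pvNB))
                = l.toList ++ ['\n'] ++ pvJ2 (PySem.Str.join "\n" (l2 :: t'.takeWhile pvNB)
                  :: pvBlocks (t'.dropWhile pvNB)) := by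
              cases hbs : pvBlocks (t'.dropWhile pvNB) with
              | nil =>
                rw [pvJ2_singleton, pvJ2_singleton, pvJoin1_cons _ _ (by simp)]
              | cons b0 bs' =>
                rw [pvJ2_cons (PySem.Str.join "\n" (l :: l2 :: t'.takeWhile pvNB)) _ (by simp),
                  pvJ2_cons (PySem.Str.join "\n" (l2 :: t'.takeWhile pvNB)) _ (by simp),
                  pvJoin1_cons _ _ (by simp)]
                simp
            rw [e2, hb]
            simp
-- final assembly
theorem pvStrip_rep (s : List Char) (b : Nat) :
    PySem.Chars.strip (s ++ List.replicate b '\n') = PySem.Chars.strip s := by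
  induction b generalizing s with
  | zero => simp
  | succ n ih =>
    have : s ++ List.replicate (n + 1) '\n' = (s ++ ['\n']) ++ List.replicate n '\n' := by
      simp [List.replicate_succ]
    rw [this, ih, pvStrip_append_nl]

set_option maxHeartbeats 1000000 in
theorem normalize_body_py_spec : Claim_equal_normalize_body_py := by
  intro text _
  show normalize_body_py text = normalize_body_py_alt text
  simp only [normalize_body_py, normalize_body_py_alt]
  rw [pvFoldl_eq_sq, pvOuter_eq]
  simp only [List.nil_append, List.drop_zero]
  unfold PySem.Str.strip
  refine congrArg String.ofList ?_
  rw [pvJ1_blocks_toList, pvJ2_blocks_toList]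
  generalize (PySem.Str.splitlines text).map PySem.Str.rstrip = lines
  cases hls : lines with
  | nil =>
    rw [show pvBlocks ([] : List String) = [] from by rw [pvBlocks]]
    rw [show pvSq ([] : List String) false = [] from rfl, pvJ1_nil, pvJ2_nil]
  | cons l t =>
    by_cases hl : l = ""
    · subst hl
      have h1 : pvSq ("" :: t) false = "" :: pvSq t true := by simp [pvSq]
      have h2 : pvSq ("" :: t) true = pvSq t true := by simp [pvSq]
      obtain ⟨b, hb⟩ := pvMain ("" :: t)
      rw [h2] at hb
      rw [h1]
      by_cases hnil : pvSq t true = []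
      · have hbn : pvBlocks ("" :: t) = [] := by
          rw [pvBlocks]; simp only [if_pos rfl]
          exact (pvBlocks_nil_iff t).mpr ((pvSq_true_nil_iff t).mp hnil)
        rw [hnil, hbn, pvJ1_singleton, pvJ2_nil]
        simp [PySem.Chars.strip, PySem.Chars.lstrip, PySem.Chars.rstrip]
      · have e1 : pvJ1 ("" :: pvSq t true) = '\n' :: pvJ1 (pvSq t true) := by
          rw [pvJ1_cons _ _ hnil]
          simp
        rw [e1, pvStrip_cons_nl, hb, pvStrip_rep]
    · have h1 : pvSq (l :: t) false = pvSq (l :: t) true := by simp [pvSq, hl]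
      obtain ⟨b, hb⟩ := pvMain (l :: t)
      rw [h1, hb, pvStrip_rep]
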